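-- pv_equiv track=rewrite | github.com/blauentag/AdventOfCode | 2025/day_06/trash_compactor.py | split_on_chars
-- ===== SOURCE A (Python) =====
-- def split_on_chars(string, positions):
--     result = []
--     current_segment = ""
--
--     for i, char in enumerate(string):
--         if i in positions:
--             if current_segment:
--                 result.append(current_segment)
--                 current_segment = ""
--         else:
--             current_segment += char
--
--     if current_segment:
--         result.append(current_segment)
--
--     return result
-- ===== SOURCE B (Python) =====
-- def split_on_chars(string, positions):
--     pos = set(positions)
--     marked = "".join("\0" if i in pos else c for i, c in enumerate(string))
--     return [seg for seg in marked.split("\0") if seg]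
-- ===== Notes on version B (the rewrite author's own statement) =====
-- stated objective: idiomatic
-- what changed: A accumulates characters one by one into a current-segment buffer with conditional flushes; B instead overwrites the dropped positions with a NUL sentinel in one pass and lets str.split plus a non-empty filter produce the segments.
import Mathlib
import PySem

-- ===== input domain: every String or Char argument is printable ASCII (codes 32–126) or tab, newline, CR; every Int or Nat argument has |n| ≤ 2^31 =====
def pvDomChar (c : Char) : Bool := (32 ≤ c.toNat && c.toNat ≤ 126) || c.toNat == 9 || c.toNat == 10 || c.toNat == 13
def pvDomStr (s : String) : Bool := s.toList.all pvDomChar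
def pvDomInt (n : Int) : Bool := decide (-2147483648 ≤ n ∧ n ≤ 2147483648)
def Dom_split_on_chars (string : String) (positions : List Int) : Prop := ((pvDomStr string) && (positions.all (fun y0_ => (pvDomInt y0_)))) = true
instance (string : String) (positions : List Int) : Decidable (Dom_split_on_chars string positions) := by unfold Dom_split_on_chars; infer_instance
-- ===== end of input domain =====

-- B replaces A's per-character accumulator loop by mark-then-split: overwrite the dropped
-- positions with a NUL sentinel in one pass and let str.split collect the segments (objective:
-- idiomatic; same return value on the stated domain, whose strings contain no NUL character).

-- ===== PORT A =====
-- A's loop state is (result, current_segment); current_segment is kept as List Char.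
def split_on_chars (string : String) (positions : List Int) : List String :=
  let st := (PySem.List.enumerate string.toList 0).foldl
    (fun (st : List String × List Char) p =>
      if p.1 ∈ positions then
        if st.2 ≠ [] then (st.1 ++ [String.ofList st.2], ([] : List Char)) else st
      else (st.1, st.2 ++ [p.2])) ([], [])
  if st.2 ≠ [] then st.1 ++ [String.ofList st.2] else st.1

-- ===== PORT B =====
def split_on_chars_alt (string : String) (positions : List Int) : List String :=
  let pos := PySem.Set.ofList positions
  let marked := (PySem.List.enumerate string.toList 0).map
    (fun p => if p.1 ∈ pos then '\x00' else p.2)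
  ((PySem.Chars.splitOn marked ['\x00']).filter (· ≠ [])).map String.ofList

-- ===== PRECONDITION & SPEC =====
def Spec_split_on_chars (string : String) (positions : List Int) (out : List String) : Prop := out = split_on_chars_alt string positions
instance (string : String) (positions : List Int) (out : List String) : Decidable (Spec_split_on_chars string positions out) := by unfold Spec_split_on_chars; infer_instance

-- ===== CLAIM (what is proved, stated in full; the proofs are below) =====
def Claim_equal_split_on_chars : Prop := ∀ (string : String) (positions : List Int), Dom_split_on_chars string positions → Spec_split_on_chars string positions (split_on_chars string positions)

-- ===== LEMMAS AND PROOFS =====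

-- structural single-NUL splitter: what PySem.Chars.splitOn computes for sep = ['\x00']
def nulSplit (cur : List Char) : List Char → List (List Char)
  | [] => [cur]
  | c :: t => if c = '\x00' then cur :: nulSplit [] t else nulSplit (cur ++ [c]) t

-- A's loop body and final flush, on the marked character level
def stepA (st : List String × List Char) (c : Char) : List String × List Char :=
  if c = '\x00' then
    if st.2 ≠ [] then (st.1 ++ [String.ofList st.2], ([] : List Char)) else st
  else (st.1, st.2 ++ [c])

def finishA (st : List String × List Char) : List String :=
  if st.2 ≠ [] then st.1 ++ [String.ofList st.2] else st.1

theorem splitOn_go_eq_nulSplit (l : List Char) : ∀ (fuel : Nat) (cur : List Char)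
    (acc : List (List Char)), l.length ≤ fuel →
    PySem.Chars.splitOn.go ['\x00'] fuel l cur acc = acc.reverse ++ nulSplit cur.reverse l := by
  induction l with
  | nil =>
    intro fuel cur acc _
    cases fuel <;> simp [PySem.Chars.splitOn.go, nulSplit]
  | cons c t ih =>
    intro fuel cur acc hf
    cases fuel with
    | zero => simp at hf
    | succ f =>
      by_cases hc : c = '\x00'
      · subst hc
        rw [show PySem.Chars.splitOn.go ['\x00'] (f + 1) ('\x00' :: t) cur acc
              = PySem.Chars.splitOn.go ['\x00'] f t [] (cur.reverse :: acc) from by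
            simp [PySem.Chars.splitOn.go, List.isPrefixOf]]
        rw [ih f [] (cur.reverse :: acc) (by simpa using hf)]
        simp [nulSplit]
      · rw [show PySem.Chars.splitOn.go ['\x00'] (f + 1) (c :: t) cur acc
              = PySem.Chars.splitOn.go ['\x00'] f t (c :: cur) acc from by
            simp [PySem.Chars.splitOn.go, List.isPrefixOf,
              show ¬'\x00' = c from fun h => hc h.symm]]
        rw [ih f (c :: cur) acc (by simpa using hf)]
        simp [nulSplit, hc]

theorem splitOn_eq_nulSplit (l : List Char) :
    PySem.Chars.splitOn l ['\x00'] = nulSplit [] l := by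
  have := splitOn_go_eq_nulSplit l (l.length + 1) [] [] (by omega)
  simpa [PySem.Chars.splitOn] using this

-- A's flush-accumulator loop over a marked character list = filter-nonempty of nulSplit
theorem foldA_eq_nulSplit (m : List Char) : ∀ (res : List String) (cur : List Char),
    finishA (m.foldl stepA (res, cur))
      = res ++ ((nulSplit cur m).filter (· ≠ [])).map String.ofList := by
  induction m with
  | nil =>
    intro res cur
    by_cases h : cur = [] <;> simp [nulSplit, finishA, h]
  | cons c t ih =>
    intro res cur
    by_cases hc : c = '\x00'
    · subst hc
      by_cases h : cur = []
      · rw [List.foldl_cons, show stepA (res, cur) '\x00' = (res, []) from by simp [stepA, h]]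
        rw [ih res []]
        simp [nulSplit, h]
      · rw [List.foldl_cons,
          show stepA (res, cur) '\x00' = (res ++ [String.ofList cur], []) from by
            simp [stepA, h]]
        rw [ih (res ++ [String.ofList cur]) []]
        simp [nulSplit, h]
    · rw [List.foldl_cons, show stepA (res, cur) c = (res, cur ++ [c]) from by simp [stepA, hc]]
      rw [ih res (cur ++ [c])]
      simp [nulSplit, hc]

theorem snd_mem_of_mem_enumerate {α : Type} {xs : List α} {s : Int} {p : Int × α}
    (h : p ∈ PySem.List.enumerate xs s) : p.2 ∈ xs := by
  have := PySem.List.map_snd_enumerate xs s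
  exact this ▸ List.mem_map_of_mem h

-- ===== VERDICT (by name: the statement is the Claim_ definition above) =====
theorem split_on_chars_spec : Claim_equal_split_on_chars := by
  intro string positions hdom
  unfold Spec_split_on_chars
  simp only [split_on_chars, split_on_chars_alt]
  have hchar : ∀ c ∈ string.toList, c ≠ '\x00' := by
    intro c hc heq
    have hd : pvDomChar c = true := by
      simp only [Dom_split_on_chars, Bool.and_eq_true, pvDomStr, List.all_eq_true] at hdom
      exact hdom.1 c hc
    subst heq
    simp [pvDomChar] at hd
  rw [splitOn_eq_nulSplit]
  have hfold : (PySem.List.enumerate string.toList 0).foldl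
      (fun (st : List String × List Char) p =>
        if p.1 ∈ positions then
          if st.2 ≠ [] then (st.1 ++ [String.ofList st.2], ([] : List Char)) else st
        else (st.1, st.2 ++ [p.2])) ([], [])
      = ((PySem.List.enumerate string.toList 0).map
          (fun p => if p.1 ∈ PySem.Set.ofList positions then '\x00' else p.2)).foldl
          stepA ([], []) := by
    rw [List.foldl_map]
    apply PySem.List.foldl_congr_mem
    intro acc p hp
    by_cases hmem : p.1 ∈ positions
    · simp [stepA, hmem, PySem.Set.mem_ofList]
    · have hne : p.2 ≠ '\x00' := hchar p.2 (snd_mem_of_mem_enumerate hp)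
      simp [stepA, hmem, PySem.Set.mem_ofList, hne]
  rw [hfold]
  simpa [finishA] using foldA_eq_nulSplit
    ((PySem.List.enumerate string.toList 0).map
      (fun p => if p.1 ∈ PySem.Set.ofList positions then '\x00' else p.2)) [] []
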